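-- pv_equiv track=rewrite | github.com/proaktivadmin/Proaktiv-Dokument-Hub | backend/app/services/sanitizer_service.py | _filter_styles
-- ===== SOURCE A (Python) =====
-- from typing import Optional, Tuple, List
--
-- def _filter_styles(style_string: str, keep_properties: List[str]) -> str:
--     """
--     Filter a CSS style string to only keep specified properties.
--
--     Args:
--         style_string: The original CSS style string.
--         keep_properties: List of CSS property names to preserve.
--
--     Returns:
--         Filtered style string with only preserved properties.
--     """
--     # Split by semicolon and process each declaration
--     declarations = style_string.split(';')
--     kept = []
--
--     for declaration in declarations:
--         declaration = declaration.strip()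
--         if not declaration or ':' not in declaration:
--             continue
--
--         prop_name = declaration.split(':')[0].strip().lower()
--
--         # Check if this property should be preserved
--         for keep_prop in keep_properties:
--             if prop_name == keep_prop or prop_name.startswith(keep_prop + '-'):
--                 kept.append(declaration)
--                 break
--
--     return '; '.join(kept)
-- ===== SOURCE B (Python) =====
-- from typing import List
--
-- def _filter_styles(style_string: str, keep_properties: List[str]) -> str:
--     """Keep only allowed CSS declarations: a set of allowed names is built once
--     and each property name is tested by membership of its dash-boundary prefixes."""
--     keep = set(keep_properties)
--     kept = []
--     for declaration in style_string.split(';'):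
--         declaration = declaration.strip()
--         if not declaration or ':' not in declaration:
--             continue
--         prop_name = declaration.split(':')[0].strip().lower()
--         if prop_name in keep or any(
--             ch == '-' and prop_name[:i] in keep
--             for i, ch in enumerate(prop_name)
--         ):
--             kept.append(declaration)
--     return '; '.join(kept)
-- ===== Notes on version B (the rewrite author's own statement) =====
-- stated objective: idiomatic
-- what changed: B builds a set of allowed property names once and keeps a declaration when one of the property name's dash-boundary prefixes is in the set (a comprehension-style filter), instead of A's inner scan over keep_properties with equality/startswith tests per declaration.
import Mathlib
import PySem

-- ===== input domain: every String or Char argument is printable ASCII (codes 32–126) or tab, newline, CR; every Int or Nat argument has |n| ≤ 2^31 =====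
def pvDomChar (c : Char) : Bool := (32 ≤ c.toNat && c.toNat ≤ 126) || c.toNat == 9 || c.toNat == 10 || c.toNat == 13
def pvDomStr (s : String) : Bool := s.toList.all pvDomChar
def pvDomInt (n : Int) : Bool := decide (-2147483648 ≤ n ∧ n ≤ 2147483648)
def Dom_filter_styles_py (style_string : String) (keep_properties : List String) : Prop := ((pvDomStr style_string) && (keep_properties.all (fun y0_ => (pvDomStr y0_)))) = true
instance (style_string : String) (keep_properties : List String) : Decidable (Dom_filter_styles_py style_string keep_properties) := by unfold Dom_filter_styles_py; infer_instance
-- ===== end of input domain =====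

-- B replaces A's inner scan over keep_properties by a set of allowed names tested
-- against the property's dash-boundary prefixes (idiomatic; same observable result).

-- ===== PORT A =====
-- inner 'for keep_prop in keep_properties: … break' loop of A
def aKeep (prop : List Char) : List String → Bool
  | [] => false
  | k :: ks =>
    if prop == k.toList || PySem.Chars.startswith prop (k.toList ++ ['-']) then true
    else aKeep prop ks

def filter_styles_py (style_string : String) (keep_properties : List String) : String :=
  let declarations := PySem.Chars.splitOn style_string.toList [';']
  let kept := declarations.foldl (fun acc declaration =>
    let d := PySem.Chars.strip declaration
    if d == [] || !PySem.Chars.isIn [':'] d then acc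
    else
      -- declaration.split(':')[0]: split never returns an empty list, so [0] is headD
      let prop := PySem.Chars.lower (PySem.Chars.strip ((PySem.Chars.splitOn d [':']).headD []))
      if aKeep prop keep_properties then acc ++ [d] else acc) ([] : List (List Char))
  String.ofList (PySem.Chars.join "; ".toList kept)

-- ===== PORT B =====
-- B's 'kept(declaration)' predicate: membership of the dash-boundary prefixes in the set
def bKept (keep : PySem.Set String) (d : List Char) : Bool :=
  if d == [] || !PySem.Chars.isIn [':'] d then false
  else
    let prop := PySem.Chars.lower (PySem.Chars.strip ((PySem.Chars.splitOn d [':']).headD []))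
    PySem.Set.contains keep (String.ofList prop) ||
      (PySem.List.enumerate prop).any (fun ic =>
        ic.2 == '-' && PySem.Set.contains keep (String.ofList (PySem.List.slice prop none (some ic.1))))

def filter_styles_py_alt (style_string : String) (keep_properties : List String) : String :=
  let keep := PySem.Set.ofList keep_properties
  String.ofList (PySem.Chars.join "; ".toList
    (((PySem.Chars.splitOn style_string.toList [';']).map PySem.Chars.strip).filter (bKept keep)))

-- ===== PRECONDITION & SPEC =====
def Spec_filter_styles_py (style_string : String) (keep_properties : List String) (out : String) : Prop := out = filter_styles_py_alt style_string keep_properties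
instance (style_string : String) (keep_properties : List String) (out : String) : Decidable (Spec_filter_styles_py style_string keep_properties out) := by unfold Spec_filter_styles_py; infer_instance

-- ===== CLAIM (what is proved, stated in full; the proofs are below) =====
def Claim_equal_filter_styles_py : Prop := ∀ (style_string : String) (keep_properties : List String), Dom_filter_styles_py style_string keep_properties → Spec_filter_styles_py style_string keep_properties (filter_styles_py style_string keep_properties)

-- ===== LEMMAS AND PROOFS =====

-- A's inner loop succeeds iff some allowed name is the property or a dash-prefixed start of it
theorem aKeep_true_iff (prop : List Char) (ks : List String) :
    aKeep prop ks = true ↔ ∃ k ∈ ks, prop = k.toList ∨ (k.toList ++ ['-']) <+: prop := by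
  induction ks with
  | nil => simp [aKeep]
  | cons k ks ih =>
    simp only [aKeep, List.mem_cons]
    split_ifs with h
    · simp only [Bool.or_eq_true, beq_iff_eq, PySem.Chars.startswith_iff] at h
      simpa using Or.inl h
    · simp only [Bool.or_eq_true, beq_iff_eq, PySem.Chars.startswith_iff] at h
      rw [not_or] at h
      constructor
      · intro ht; rcases (ih.mp ht) with ⟨k', hk', hc⟩; exact ⟨k', Or.inr hk', hc⟩
      · rintro ⟨k', hk' | hk', hc⟩
        · subst hk'; rcases hc with hc | hc
          · exact absurd hc h.1
          · exact absurd hc h.2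
        · exact ih.mpr ⟨k', hk', hc⟩

-- (u ++ [c]) is a prefix of l iff l has c at position u.length right after the prefix u
theorem append_singleton_prefix_iff (u l : List Char) (c : Char) :
    (u ++ [c]) <+: l ↔ ∃ (h : u.length < l.length), l.take u.length = u ∧ l[u.length] = c := by
  constructor
  · rintro ⟨t, ht⟩
    subst ht
    have hlen : u.length < (u ++ [c] ++ t).length := by simp
    refine ⟨hlen, ?_, ?_⟩
    · rw [List.append_assoc]; exact List.take_left' rfl
    · rw [List.getElem_append_left (by simp)]
      exact List.getElem_concat_length rfl (by simp)
  · rintro ⟨h, htake, hget⟩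
    have : u ++ [c] = l.take (u.length + 1) := by
      rw [List.take_add_one, htake]
      simp [List.getElem?_eq_getElem h, hget]
    rw [this]
    exact List.take_prefix _ _
-- B's prefix-set test equals A's scan over the allowed names
theorem keep_eq (ks : List String) (prop : List Char) :
    aKeep prop ks =
      (PySem.Set.contains (PySem.Set.ofList ks) (String.ofList prop) ||
        (PySem.List.enumerate prop).any (fun ic =>
          ic.2 == '-' && PySem.Set.contains (PySem.Set.ofList ks)
            (String.ofList (PySem.List.slice prop none (some ic.1))))) := by
  rw [Bool.eq_iff_iff, aKeep_true_iff]
  simp only [Bool.or_eq_true, List.any_eq_true, Bool.and_eq_true, beq_iff_eq,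
    PySem.Set.contains_iff, PySem.Set.mem_ofList, PySem.List.mem_enumerate_iff]
  constructor
  · rintro ⟨k, hk, hc | hc⟩
    · left
      have : String.ofList prop = k := by
        subst hc; exact String.ofList_toList
      rwa [this]
    · right
      rcases (append_singleton_prefix_iff _ _ _ |>.mp hc) with ⟨hlen, htake, hget⟩
      refine ⟨(0 + (k.toList.length : Int), prop[k.toList.length]),
        ⟨k.toList.length, hlen, rfl⟩, by simpa using hget, ?_⟩
      rw [show ((0 : Int) + ((k.toList.length : Nat) : Int)) = ((k.toList.length : Nat) : Int) by omega,
        PySem.List.slice_to_natCast, htake]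
      rw [String.ofList_toList]
      exact hk
  · rintro (hmem | ⟨ic, ⟨j, hj, hic⟩, hdash, hmem⟩)
    · exact ⟨String.ofList prop, hmem, Or.inl String.toList_ofList.symm⟩
    · subst hic
      simp only at hdash hmem
      rw [show ((0 : Int) + (j : Int)) = ((j : Nat) : Int) by omega,
        PySem.List.slice_to_natCast] at hmem
      have hj' : j ≤ prop.length := le_of_lt hj
      refine ⟨String.ofList (prop.take j), hmem, Or.inr ?_⟩
      rw [String.toList_ofList]
      exact (append_singleton_prefix_iff _ _ _).mpr
        ⟨by simpa [Nat.min_eq_left hj'] using hj,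
         by simp [List.length_take, Nat.min_eq_left hj'],
         by simpa [List.length_take, Nat.min_eq_left hj'] using hdash⟩

-- ===== VERDICT (by name: the statement is the Claim_ definition above) =====
theorem filter_styles_py_spec : Claim_equal_filter_styles_py := by
  intro s ks _
  unfold Spec_filter_styles_py filter_styles_py filter_styles_py_alt
  have key : ∀ (l : List (List Char)),
      l.foldl (fun acc declaration =>
        let d := PySem.Chars.strip declaration
        if d == [] || !PySem.Chars.isIn [':'] d then acc
        else
          let prop := PySem.Chars.lower (PySem.Chars.strip ((PySem.Chars.splitOn d [':']).headD []))
          if aKeep prop ks then acc ++ [d] else acc) ([] : List (List Char)) =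
      (l.map PySem.Chars.strip).filter (bKept (PySem.Set.ofList ks)) := by
    intro l
    have hbody : ∀ (acc : List (List Char)) (x : List Char), x ∈ l →
        (let d := PySem.Chars.strip x;
         if d == [] || !PySem.Chars.isIn [':'] d then acc
         else
           let prop := PySem.Chars.lower (PySem.Chars.strip ((PySem.Chars.splitOn d [':']).headD []))
           if aKeep prop ks then acc ++ [d] else acc) =
        (if bKept (PySem.Set.ofList ks) (PySem.Chars.strip x) then acc ++ [PySem.Chars.strip x] else acc) := by
      intro acc x _
      by_cases hc : (PySem.Chars.strip x == [] || !PySem.Chars.isIn [':'] (PySem.Chars.strip x)) = true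
      · simp only [bKept]; rw [hc]; simp
      · have hcf := eq_false_of_ne_true hc
        simp only [bKept]; rw [hcf, keep_eq ks]; simp [List.headD]
    rw [PySem.List.foldl_congr_mem l _ _ _ hbody]
    rw [PySem.List.foldl_append_if (p := fun x => bKept (PySem.Set.ofList ks) (PySem.Chars.strip x))
      (f := PySem.Chars.strip)]
    rw [List.filter_map]
    rfl
  show String.ofList (PySem.Chars.join "; ".toList
      ((PySem.Chars.splitOn s.toList [';']).foldl (fun acc declaration =>
        let d := PySem.Chars.strip declaration
        if d == [] || !PySem.Chars.isIn [':'] d then acc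
        else
          let prop := PySem.Chars.lower (PySem.Chars.strip ((PySem.Chars.splitOn d [':']).headD []))
          if aKeep prop ks then acc ++ [d] else acc) ([] : List (List Char)))) =
    String.ofList (PySem.Chars.join "; ".toList
      (((PySem.Chars.splitOn s.toList [';']).map PySem.Chars.strip).filter (bKept (PySem.Set.ofList ks))))
  rw [key]
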